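-- pv_equiv track=rewrite | github.com/Trance-0/Gitea-repo-sync-check | ai-gen.py | analyze_melody_functions
-- ===== SOURCE A (Python) =====
-- from typing import List, Dict, Any
--
-- def analyze_melody_functions(
--     melody_pcs: List[int],
--     chord_scale_pcs: List[int],
--     chord_root_pc: int,
-- ) -> Dict[int, List[str]]:
--     """
--     VERY simple heuristic classification of notes in a single-chord context.
--     Returns dict: index -> [labels].
--     Labels: 'guide_tone', 'arpeggio', 'scale_line',
--             'upper_neighbor', 'lower_neighbor',
--             'passing', 'chromatic_passing'
--     """
--     n = len(melody_pcs)
--     labels: Dict[int, List[str]] = {i: [] for i in range(n)}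
--
--     # Identify chord tones (1,3,5,7) in this mode (use major-ish mapping)
--     chord_tone_semitones = [0, 4, 7, 11]  # 1,3,5,7 above root in semitones
--     chord_tones = [ (chord_root_pc + x) % 12 for x in chord_tone_semitones ]
--     guide_tones = [ (chord_root_pc + 4) % 12, (chord_root_pc + 11) % 12 ]  # 3 & 7
--
--     for i, pc in enumerate(melody_pcs):
--         if pc in guide_tones:
--             labels[i].append("guide_tone")
--         elif pc in chord_tones:
--             labels[i].append("chord_tone")
--
--     # Scale lines: three consecutive stepwise notes
--     for i in range(1, n - 1):
--         a, b, c = melody_pcs[i - 1], melody_pcs[i], melody_pcs[i + 1]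
--         d1 = (b - a) % 12
--         d2 = (c - b) % 12
--         if d1 in (1, 2, 10, 11) and d2 == d1:  # crude ascending/descending step
--             labels[i - 1].append("scale_line")
--             labels[i].append("scale_line")
--             labels[i + 1].append("scale_line")
--
--     # Neighbor tones (upper / lower)
--     for i in range(1, n - 1):
--         a, b, c = melody_pcs[i - 1], melody_pcs[i], melody_pcs[i + 1]
--         if a == c and a in chord_tones:
--             step = (b - a) % 12
--             if step in (1, 2):  # up
--                 labels[i].append("upper_neighbor")
--             elif step in (10, 11):  # down
--                 labels[i].append("lower_neighbor")
--
--     # Passing and chromatic passing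
--     for i in range(1, n - 1):
--         a, b, c = melody_pcs[i - 1], melody_pcs[i], melody_pcs[i + 1]
--         # require chord tones on ends, non-chord in middle
--         if a in chord_tones and c in chord_tones and b not in chord_tones:
--             up = (b - a) % 12
--             down = (c - b) % 12
--             if up in (1, 2, 10, 11) and down in (1, 2, 10, 11):
--                 # if b in chord scale -> passing; else chromatic passing
--                 if b in chord_scale_pcs:
--                     labels[i].append("passing_tone")
--                 else:
--                     labels[i].append("chromatic_passing_tone")
--
--     return labels
-- ===== SOURCE B (Python) =====
-- from typing import List, Dict
--
--
-- def analyze_melody_functions(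
--     melody_pcs: List[int],
--     chord_scale_pcs: List[int],
--     chord_root_pc: int,
-- ) -> Dict[int, List[str]]:
--     """Single windowed pass: all labels for index i are computed locally."""
--     n = len(melody_pcs)
--     chord_tones = {(chord_root_pc + x) % 12 for x in (0, 4, 7, 11)}
--     guide_tones = {(chord_root_pc + 4) % 12, (chord_root_pc + 11) % 12}
--     steps = (1, 2, 10, 11)
--
--     def uniform_step(c: int) -> bool:
--         # center c of a stepwise three-note line (requires 1 <= c <= n-2)
--         a, b, d = melody_pcs[c - 1], melody_pcs[c], melody_pcs[c + 1]
--         d1 = (b - a) % 12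
--         return d1 in steps and (d - b) % 12 == d1
--
--     out: Dict[int, List[str]] = {}
--     for i in range(n):
--         lab: List[str] = []
--         pc = melody_pcs[i]
--         if pc in guide_tones:
--             lab.append("guide_tone")
--         elif pc in chord_tones:
--             lab.append("chord_tone")
--         # scale_line: one label per qualifying center around i, in center order
--         for c in (i - 1, i, i + 1):
--             if 1 <= c <= n - 2 and uniform_step(c):
--                 lab.append("scale_line")
--         if 1 <= i <= n - 2:
--             a, b, c = melody_pcs[i - 1], melody_pcs[i], melody_pcs[i + 1]
--             if a == c and a in chord_tones:
--                 step = (b - a) % 12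
--                 if step in (1, 2):
--                     lab.append("upper_neighbor")
--                 elif step in (10, 11):
--                     lab.append("lower_neighbor")
--             if a in chord_tones and c in chord_tones and b not in chord_tones:
--                 up = (b - a) % 12
--                 down = (c - b) % 12
--                 if up in (1, 2, 10, 11) and down in (1, 2, 10, 11):
--                     lab.append("passing_tone" if b in chord_scale_pcs else "chromatic_passing_tone")
--         out[i] = lab
--     return out
-- ===== Notes on version B (the rewrite author's own statement) =====
-- stated objective: alternative
-- what changed: A builds a dict of empty label lists and mutates it in four separate index-range passes (guide/chord, scale-line scatter over three neighbours, neighbour tones, passing tones); B computes each index's complete label list locally in one windowed pass, replicating the scale_line scatter by checking the three possible centers i-1, i, i+1 in order.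
import Mathlib
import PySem

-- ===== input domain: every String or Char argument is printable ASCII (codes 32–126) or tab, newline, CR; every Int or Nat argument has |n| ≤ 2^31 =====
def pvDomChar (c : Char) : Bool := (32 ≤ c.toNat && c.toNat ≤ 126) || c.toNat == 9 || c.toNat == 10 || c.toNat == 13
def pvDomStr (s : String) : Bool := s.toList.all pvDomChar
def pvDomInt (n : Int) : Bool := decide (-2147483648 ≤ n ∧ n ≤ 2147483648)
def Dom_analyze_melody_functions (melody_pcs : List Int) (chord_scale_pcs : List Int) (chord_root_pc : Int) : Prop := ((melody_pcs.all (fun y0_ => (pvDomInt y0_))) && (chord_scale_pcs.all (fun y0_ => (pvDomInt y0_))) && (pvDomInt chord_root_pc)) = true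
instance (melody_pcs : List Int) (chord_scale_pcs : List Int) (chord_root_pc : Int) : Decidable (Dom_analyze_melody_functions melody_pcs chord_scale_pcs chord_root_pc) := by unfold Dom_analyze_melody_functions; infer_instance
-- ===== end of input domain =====

-- B replaces A's four separate passes over the melody by ONE windowed pass that computes
-- every label of index i locally (objective: alternative decomposition, same O(n) cost).

-- ===== PORT A =====
-- Faithful transliteration of A's four passes over a dict {i: []}.
-- melody_pcs[i±1] inside 'for i in range(1, n-1)' is always in range, so pyGetD with
-- default 0 is exact there.
def analyze_melody_functions (melody_pcs : List Int) (chord_scale_pcs : List Int) (chord_root_pc : Int) : List (Int × List String) :=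
  let n : Int := melody_pcs.length
  let labels0 : PySem.Dict Int (List String) :=
    (PySem.List.pyRange 0 n).foldl (fun d i => d.insert i []) PySem.Dict.empty
  let chord_tone_semitones : List Int := [0, 4, 7, 11]
  let chord_tones : List Int := chord_tone_semitones.map (fun x => PySem.Int.mod (chord_root_pc + x) 12)
  let guide_tones : List Int := [PySem.Int.mod (chord_root_pc + 4) 12, PySem.Int.mod (chord_root_pc + 11) 12]
  let labels1 := (PySem.List.enumerate melody_pcs).foldl (fun d p =>
      if p.2 ∈ guide_tones then d.modify p.1 [] (· ++ ["guide_tone"])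
      else if p.2 ∈ chord_tones then d.modify p.1 [] (· ++ ["chord_tone"])
      else d) labels0
  let labels2 := (PySem.List.pyRange 1 (n - 1)).foldl (fun d i =>
      let a := PySem.List.pyGetD melody_pcs (i - 1) 0
      let b := PySem.List.pyGetD melody_pcs i 0
      let c := PySem.List.pyGetD melody_pcs (i + 1) 0
      let d1 := PySem.Int.mod (b - a) 12
      let d2 := PySem.Int.mod (c - b) 12
      if (d1 = 1 ∨ d1 = 2 ∨ d1 = 10 ∨ d1 = 11) ∧ d2 = d1 then
        ((d.modify (i - 1) [] (· ++ ["scale_line"])).modify i [] (· ++ ["scale_line"])).modify (i + 1) [] (· ++ ["scale_line"])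
      else d) labels1
  let labels3 := (PySem.List.pyRange 1 (n - 1)).foldl (fun d i =>
      let a := PySem.List.pyGetD melody_pcs (i - 1) 0
      let b := PySem.List.pyGetD melody_pcs i 0
      let c := PySem.List.pyGetD melody_pcs (i + 1) 0
      if a = c ∧ a ∈ chord_tones then
        let step := PySem.Int.mod (b - a) 12
        if step = 1 ∨ step = 2 then d.modify i [] (· ++ ["upper_neighbor"])
        else if step = 10 ∨ step = 11 then d.modify i [] (· ++ ["lower_neighbor"])
        else d
      else d) labels2
  let labels4 := (PySem.List.pyRange 1 (n - 1)).foldl (fun d i =>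
      let a := PySem.List.pyGetD melody_pcs (i - 1) 0
      let b := PySem.List.pyGetD melody_pcs i 0
      let c := PySem.List.pyGetD melody_pcs (i + 1) 0
      if a ∈ chord_tones ∧ c ∈ chord_tones ∧ b ∉ chord_tones then
        let up := PySem.Int.mod (b - a) 12
        let down := PySem.Int.mod (c - b) 12
        if (up = 1 ∨ up = 2 ∨ up = 10 ∨ up = 11) ∧ (down = 1 ∨ down = 2 ∨ down = 10 ∨ down = 11) then
          if b ∈ chord_scale_pcs then d.modify i [] (· ++ ["passing_tone"])
          else d.modify i [] (· ++ ["chromatic_passing_tone"])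
        else d
      else d) labels3
  labels4.items

-- ===== PORT B =====
-- B-side helpers (Source B's sets and its uniform_step test)
def pvChordTones (chord_root_pc : Int) : PySem.Set Int :=
  PySem.Set.ofList ([0, 4, 7, 11].map (fun x => PySem.Int.mod (chord_root_pc + x) 12))

def pvGuideTones (chord_root_pc : Int) : PySem.Set Int :=
  PySem.Set.ofList [PySem.Int.mod (chord_root_pc + 4) 12, PySem.Int.mod (chord_root_pc + 11) 12]

def pvUniformStep (melody_pcs : List Int) (c : Int) : Bool :=
  let a := PySem.List.pyGetD melody_pcs (c - 1) 0
  let b := PySem.List.pyGetD melody_pcs c 0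
  let d := PySem.List.pyGetD melody_pcs (c + 1) 0
  let d1 := PySem.Int.mod (b - a) 12
  decide ((d1 = 1 ∨ d1 = 2 ∨ d1 = 10 ∨ d1 = 11) ∧ PySem.Int.mod (d - b) 12 = d1)

-- all labels of output index i, computed locally from its window
def pvAltLab (melody_pcs : List Int) (chord_scale_pcs : List Int) (chord_root_pc : Int) (n i : Int) : List String :=
  let pc := PySem.List.pyGetD melody_pcs i 0
  let first : List String :=
    if pc ∈ pvGuideTones chord_root_pc then ["guide_tone"]
    else if pc ∈ pvChordTones chord_root_pc then ["chord_tone"]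
    else []
  let scale : List String :=
    ([i - 1, i, i + 1].filter (fun c => decide (1 ≤ c ∧ c ≤ n - 2) && pvUniformStep melody_pcs c)).map
      (fun _ => "scale_line")
  let rest : List String :=
    if 1 ≤ i ∧ i ≤ n - 2 then
      let a := PySem.List.pyGetD melody_pcs (i - 1) 0
      let b := PySem.List.pyGetD melody_pcs i 0
      let c := PySem.List.pyGetD melody_pcs (i + 1) 0
      let nb : List String :=
        if a = c ∧ a ∈ pvChordTones chord_root_pc then
          let step := PySem.Int.mod (b - a) 12
          if step = 1 ∨ step = 2 then ["upper_neighbor"]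
          else if step = 10 ∨ step = 11 then ["lower_neighbor"]
          else []
        else []
      let ps : List String :=
        if a ∈ pvChordTones chord_root_pc ∧ c ∈ pvChordTones chord_root_pc ∧ b ∉ pvChordTones chord_root_pc then
          let up := PySem.Int.mod (b - a) 12
          let down := PySem.Int.mod (c - b) 12
          if (up = 1 ∨ up = 2 ∨ up = 10 ∨ up = 11) ∧ (down = 1 ∨ down = 2 ∨ down = 10 ∨ down = 11) then
            if b ∈ chord_scale_pcs then ["passing_tone"] else ["chromatic_passing_tone"]
          else []
        else []
      nb ++ ps
    else []
  first ++ scale ++ rest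

def analyze_melody_functions_alt (melody_pcs : List Int) (chord_scale_pcs : List Int) (chord_root_pc : Int) : List (Int × List String) :=
  let n : Int := melody_pcs.length
  (PySem.List.pyRange 0 n).map (fun i => (i, pvAltLab melody_pcs chord_scale_pcs chord_root_pc n i))

-- ===== PRECONDITION & SPEC =====
def Spec_analyze_melody_functions (melody_pcs : List Int) (chord_scale_pcs : List Int) (chord_root_pc : Int) (out : List (Int × List String)) : Prop := out = analyze_melody_functions_alt melody_pcs chord_scale_pcs chord_root_pc
instance (melody_pcs : List Int) (chord_scale_pcs : List Int) (chord_root_pc : Int) (out : List (Int × List String)) : Decidable (Spec_analyze_melody_functions melody_pcs chord_scale_pcs chord_root_pc out) := by unfold Spec_analyze_melody_functions; infer_instance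

-- ===== CLAIM (what is proved, stated in full; the proofs are below) =====
def Claim_equal_analyze_melody_functions : Prop := ∀ (melody_pcs : List Int) (chord_scale_pcs : List Int) (chord_root_pc : Int), Dom_analyze_melody_functions melody_pcs chord_scale_pcs chord_root_pc → Spec_analyze_melody_functions melody_pcs chord_scale_pcs chord_root_pc (analyze_melody_functions melody_pcs chord_scale_pcs chord_root_pc)

-- ===== LEMMAS AND PROOFS =====

-- keys are preserved by any fold whose step preserves them
theorem pv_keys_foldl {α : Type} (L : List α) (step : PySem.Dict Int (List String) → α → PySem.Dict Int (List String))
    (K : List Int) (h : ∀ d a, a ∈ L → d.keys = K → (step d a).keys = K) :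
    ∀ d : PySem.Dict Int (List String), d.keys = K → (L.foldl step d).keys = K := by
  induction L with
  | nil => intro d hd; simpa using hd
  | cons x t ih =>
    intro d hd
    simp only [List.foldl_cons]
    exact ih (fun d a ha => h d a (List.mem_cons_of_mem _ ha)) _ (h d x (List.mem_cons_self) hd)

theorem pv_keys_modify_mem (d : PySem.Dict Int (List String)) (k : Int) (f : List String → List String)
    (K : List Int) (hd : d.keys = K) (hk : k ∈ K) : (d.modify k [] f).keys = K := by
  rw [PySem.Dict.keys_modify, PySem.Dict.keys_insert_of_contains]
  · exact hd
  · exact (PySem.Dict.contains_iff_mem_keys d k).2 (hd ▸ hk)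


theorem pv_getD_init (L : List Int) (d : PySem.Dict Int (List String))
    (h : ∀ c, d.getD c ([] : List String) = []) (c : Int) :
    (L.foldl (fun d i => d.insert i []) d).getD c [] = [] := by
  induction L generalizing d with
  | nil => simpa using h c
  | cons x t ih =>
    simp only [List.foldl_cons]
    exact ih _ (fun c' => by rw [PySem.Dict.getD_insert]; split <;> simp [h])

theorem pv_getD_pass3 (C1 C2 C3 : Int → Prop) [DecidablePred C1] [DecidablePred C2] [DecidablePred C3]
    (L : List Int) (d : PySem.Dict Int (List String)) (c : Int) :
    (L.foldl (fun d i =>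
      if C1 i then
        if C2 i then d.modify i [] (· ++ ["upper_neighbor"])
        else if C3 i then d.modify i [] (· ++ ["lower_neighbor"])
        else d
      else d) d).getD c []
    = d.getD c [] ++ (L.filter (fun i => decide (i = c) && decide (C1 i) && (decide (C2 i) || decide (C3 i)))).map
        (fun i => if C2 i then "upper_neighbor" else "lower_neighbor") := by
  induction L generalizing d with
  | nil => simp
  | cons x t ih =>
    simp only [List.foldl_cons, List.filter_cons]
    rw [ih]
    by_cases hc : x = c
    · subst hc
      by_cases h1 : C1 x <;> by_cases h2 : C2 x <;> by_cases h3 : C3 x <;>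
        simp [h1, h2, h3]
    · have hc' : ¬ c = x := fun h => hc h.symm
      by_cases h1 : C1 x <;> by_cases h2 : C2 x <;> by_cases h3 : C3 x <;>
        simp [hc, hc', h1, h2, h3, PySem.Dict.getD_modify]

theorem pv_pyGetD_cons_pos {α : Type} (x : α) (t : List α) (k : Int) (d : α) (hk : 1 ≤ k) :
    PySem.List.pyGetD (x :: t) k d = PySem.List.pyGetD t (k - 1) d := by
  simp only [PySem.List.pyGetD, PySem.List.pyGet?, PySem.List.pyIdx?, List.length_cons]
  by_cases h1 : k < (t.length : Int) + 1
  · have h2 : k - 1 < (t.length : Int) := by omega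
    simp only [if_pos (by omega : (0:Int) ≤ k), if_pos (by omega : (0:Int) ≤ k - 1),
      if_pos (by push_cast; omega : k < ((t.length + 1 : Nat) : Int)), if_pos h2]
    have : k.toNat = (k - 1).toNat + 1 := by omega
    rw [this]
    simp
  · simp only [if_pos (by omega : (0:Int) ≤ k), if_pos (by omega : (0:Int) ≤ k - 1),
      if_neg (by push_cast; omega : ¬ k < ((t.length + 1 : Nat) : Int)),
      if_neg (by omega : ¬ k - 1 < (t.length : Int))]
    simp

theorem pv_pyGetD_cons_zero {α : Type} (x : α) (t : List α) (d : α) :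
    PySem.List.pyGetD (x :: t) 0 d = x := by
  simp [PySem.List.pyGetD, PySem.List.pyGet?, PySem.List.pyIdx?]

theorem pv_mem_enumerate_bounds {α : Type} (xs : List α) (s : Int) :
    ∀ p ∈ PySem.List.enumerate xs s, s ≤ p.1 ∧ p.1 < s + xs.length := by
  induction xs generalizing s with
  | nil => simp [PySem.List.enumerate]
  | cons x t ih =>
    intro p hp
    simp only [PySem.List.enumerate, List.mem_cons] at hp
    rcases hp with h | h
    · subst h; simp
    · have := ih (s + 1) p h
      simp [List.length_cons]
      omega

theorem pv_enum_filter (xs : List Int) (s c : Int) (q : Int × Int → Bool)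
    (hq : ∀ pr, q pr = true → pr.1 = c) (hc : s ≤ c ∧ c < s + xs.length) :
    (PySem.List.enumerate xs s).filter q
    = if q (c, PySem.List.pyGetD xs (c - s) 0) then [(c, PySem.List.pyGetD xs (c - s) 0)] else [] := by
  induction xs generalizing s with
  | nil => simp at hc; omega
  | cons x t ih =>
    simp only [PySem.List.enumerate, List.filter_cons]
    by_cases hcs : c = s
    · subst hcs
      have ht : (PySem.List.enumerate t (c + 1)).filter q = [] := by
        rw [List.filter_eq_nil_iff]
        intro p hp hqp
        have h1 := hq p hqp
        have h2 := pv_mem_enumerate_bounds t (c + 1) p hp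
        omega
      have hg : PySem.List.pyGetD (x :: t) (c - c) 0 = x := by
        simp only [sub_self]
        exact pv_pyGetD_cons_zero x t 0
      rw [hg]
      by_cases hh : q (c, x) <;> simp [hh, ht]
    · have hx : ¬ q (s, x) = true := fun h => hcs ((hq _ h).symm)
      have hg : PySem.List.pyGetD (x :: t) (c - s) 0 = PySem.List.pyGetD t (c - (s + 1)) 0 := by
        rw [pv_pyGetD_cons_pos x t (c - s) 0 (by omega)]
        ring_nf
      simp only [hx, Bool.false_eq_true, if_false]
      rw [ih (s + 1) ⟨by omega, by simp at hc ⊢; omega⟩, hg]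

theorem pv_filter_eq_single (L : List Int) (h : L.Nodup) (c : Int) (p : Int → Bool)
    (hp : ∀ i, p i = true → i = c) :
    L.filter p = if c ∈ L ∧ p c = true then [c] else [] := by
  induction L with
  | nil => simp
  | cons x t ih =>
    have hnd := h.of_cons
    have hx := (List.nodup_cons.mp h).1
    simp only [List.filter_cons, List.mem_cons]
    by_cases hpx : p x = true
    · have := hp x hpx
      subst this
      have : ¬ (x ∈ t ∧ p x = true) := fun ⟨h1, _⟩ => hx h1
      rw [ih hnd]
      simp [hpx, hx]
    · rw [ih hnd]
      by_cases hct : c ∈ t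
      · simp [hpx, hct]
      · by_cases hcx : c = x
        · subst hcx; simp [hpx, hct]
        · simp only [hct, false_and, if_false]
          simp [hpx, fun (h : c = x) => hcx h]

theorem pv_getD_pass4 (C1 C2 C3 : Int → Prop) [DecidablePred C1] [DecidablePred C2] [DecidablePred C3]
    (L : List Int) (d : PySem.Dict Int (List String)) (c : Int) :
    (L.foldl (fun d i =>
      if C1 i then
        if C2 i then
          if C3 i then d.modify i [] (· ++ ["passing_tone"])
          else d.modify i [] (· ++ ["chromatic_passing_tone"])
        else d
      else d) d).getD c []
    = d.getD c [] ++ (L.filter (fun i => decide (i = c) && decide (C1 i) && decide (C2 i))).map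
        (fun i => if C3 i then "passing_tone" else "chromatic_passing_tone") := by
  induction L generalizing d with
  | nil => simp
  | cons x t ih =>
    simp only [List.foldl_cons, List.filter_cons]
    rw [ih]
    by_cases hc : x = c
    · subst hc
      by_cases h1 : C1 x <;> by_cases h2 : C2 x <;> by_cases h3 : C3 x <;>
        simp [h1, h2, h3]
    · have hc' : ¬ c = x := fun h => hc h.symm
      by_cases h1 : C1 x <;> by_cases h2 : C2 x <;> by_cases h3 : C3 x <;>
        simp [hc, hc', h1, h2, h3, PySem.Dict.getD_modify]

theorem pv_scale_filter (n c : Int) (q : Int → Bool) :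
    ((PySem.List.pyRange 1 (n - 1)).filter
        (fun i => q i && (decide (c = i - 1) || decide (c = i) || decide (c = i + 1)))).map
      (fun _ => ("scale_line" : String))
    = (([c - 1, c, c + 1] : List Int).filter (fun i => decide (1 ≤ i ∧ i ≤ n - 2) && q i)).map
      (fun _ => ("scale_line" : String)) := by
  rw [List.map_const', List.map_const']
  congr 1
  apply List.Perm.length_eq
  have h3 : ([c - 1, c, c + 1] : List Int).Nodup := by
    simp
    omega
  rw [List.perm_ext_iff_of_nodup ((PySem.List.nodup_pyRange_one 1 (n - 1)).filter _) (h3.filter _)]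
  intro a
  simp only [List.mem_filter, PySem.List.mem_pyRange_one, List.mem_cons, List.not_mem_nil,
    or_false, Bool.and_eq_true, Bool.or_eq_true, decide_eq_true_eq]
  constructor
  · rintro ⟨⟨ha1, ha2⟩, hq, hw⟩
    exact ⟨by omega, ⟨by omega, hq⟩⟩
  · rintro ⟨hw, ⟨hb, hq⟩⟩
    exact ⟨by omega, hq, by omega⟩

theorem pv_getD_pass1 (g ct : List Int) (L : List (Int × Int)) (d : PySem.Dict Int (List String)) (c : Int) :
    (L.foldl (fun d p =>
      if p.2 ∈ g then d.modify p.1 [] (· ++ ["guide_tone"])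
      else if p.2 ∈ ct then d.modify p.1 [] (· ++ ["chord_tone"])
      else d) d).getD c []
    = d.getD c [] ++ ((L.filter (fun p => decide (p.1 = c) && (decide (p.2 ∈ g) || decide (p.2 ∈ ct)))).map
        (fun p => if p.2 ∈ g then "guide_tone" else "chord_tone")) := by
  induction L generalizing d with
  | nil => simp
  | cons p t ih =>
    simp only [List.foldl_cons, List.filter_cons]
    rw [ih]
    by_cases hc : p.1 = c
    · by_cases hg : p.2 ∈ g <;> by_cases hct : p.2 ∈ ct <;>
        simp [hc, hg, hct]
    · have hc' : ¬ c = p.1 := fun h => hc h.symm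
      by_cases hg : p.2 ∈ g <;> by_cases hct : p.2 ∈ ct <;>
        simp [hc, hc', hg, hct, PySem.Dict.getD_modify]

theorem pv_getD_pass2 (cond : Int → Prop) [DecidablePred cond] (L : List Int) (d : PySem.Dict Int (List String)) (c : Int) :
    (L.foldl (fun d i =>
      if cond i then
        ((d.modify (i - 1) [] (· ++ ["scale_line"])).modify i [] (· ++ ["scale_line"])).modify (i + 1) [] (· ++ ["scale_line"])
      else d) d).getD c []
    = d.getD c [] ++ (L.filter (fun i => decide (cond i) && (decide (c = i - 1) || decide (c = i) || decide (c = i + 1)))).map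
        (fun _ => "scale_line") := by
  induction L generalizing d with
  | nil => simp
  | cons x t ih =>
    simp only [List.foldl_cons, List.filter_cons]
    rw [ih]
    by_cases hx : cond x
    · have e1 : ¬ ((x:Int) - 1 = x) := by omega
      have e2 : ¬ ((x:Int) - 1 = x + 1) := by omega
      have e3 : ¬ ((x:Int) = x + 1) := by omega
      have e4 : ¬ ((x:Int) + 1 = x - 1) := by omega
      have e5 : ¬ ((x:Int) + 1 = x) := by omega
      have e6 : ¬ ((x:Int) = x - 1) := by omega
      by_cases h1 : c = x - 1 <;> by_cases h2 : c = x <;> by_cases h3 : c = x + 1 <;>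
      first
      | (exfalso; omega)
      | simp [hx, h1, h2, h3, e1, e2, e3, e4, e5, e6, PySem.Dict.getD_modify]
    · simp [hx]

set_option maxHeartbeats 2000000 in
theorem analyze_melody_functions_spec : Claim_equal_analyze_melody_functions := by
  intro melody cs root _
  unfold Spec_analyze_melody_functions
  unfold analyze_melody_functions analyze_melody_functions_alt pvAltLab pvGuideTones pvChordTones pvUniformStep
  dsimp only
  set CT := List.map (fun x => PySem.Int.mod (root + x) 12) ([0, 4, 7, 11] : List Int) with hCT
  set GT := ([PySem.Int.mod (root + 4) 12, PySem.Int.mod (root + 11) 12] : List Int) with hGT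
  set n := (melody.length : Int) with hn
  set D0 := (PySem.List.pyRange 0 n).foldl (fun d i => d.insert i ([] : List String)) PySem.Dict.empty with hD0
  set D1 := (PySem.List.enumerate melody).foldl (fun d p =>
      if p.2 ∈ GT then d.modify p.1 [] (· ++ ["guide_tone"])
      else if p.2 ∈ CT then d.modify p.1 [] (· ++ ["chord_tone"])
      else d) D0 with hD1
  set D2 := (PySem.List.pyRange 1 (n - 1)).foldl (fun d i =>
      if (PySem.Int.mod (PySem.List.pyGetD melody i 0 - PySem.List.pyGetD melody (i - 1) 0) 12 = 1 ∨
          PySem.Int.mod (PySem.List.pyGetD melody i 0 - PySem.List.pyGetD melody (i - 1) 0) 12 = 2 ∨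
          PySem.Int.mod (PySem.List.pyGetD melody i 0 - PySem.List.pyGetD melody (i - 1) 0) 12 = 10 ∨
          PySem.Int.mod (PySem.List.pyGetD melody i 0 - PySem.List.pyGetD melody (i - 1) 0) 12 = 11) ∧
          PySem.Int.mod (PySem.List.pyGetD melody (i + 1) 0 - PySem.List.pyGetD melody i 0) 12 =
            PySem.Int.mod (PySem.List.pyGetD melody i 0 - PySem.List.pyGetD melody (i - 1) 0) 12 then
        ((d.modify (i - 1) [] (· ++ ["scale_line"])).modify i [] (· ++ ["scale_line"])).modify (i + 1) [] (· ++ ["scale_line"])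
      else d) D1 with hD2
  set D3 := (PySem.List.pyRange 1 (n - 1)).foldl (fun d i =>
      if PySem.List.pyGetD melody (i - 1) 0 = PySem.List.pyGetD melody (i + 1) 0 ∧
          PySem.List.pyGetD melody (i - 1) 0 ∈ CT then
        if PySem.Int.mod (PySem.List.pyGetD melody i 0 - PySem.List.pyGetD melody (i - 1) 0) 12 = 1 ∨
            PySem.Int.mod (PySem.List.pyGetD melody i 0 - PySem.List.pyGetD melody (i - 1) 0) 12 = 2 then
          d.modify i [] (· ++ ["upper_neighbor"])
        else if PySem.Int.mod (PySem.List.pyGetD melody i 0 - PySem.List.pyGetD melody (i - 1) 0) 12 = 10 ∨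
            PySem.Int.mod (PySem.List.pyGetD melody i 0 - PySem.List.pyGetD melody (i - 1) 0) 12 = 11 then
          d.modify i [] (· ++ ["lower_neighbor"])
        else d
      else d) D2 with hD3
  set D4 := (PySem.List.pyRange 1 (n - 1)).foldl (fun d i =>
      if PySem.List.pyGetD melody (i - 1) 0 ∈ CT ∧ PySem.List.pyGetD melody (i + 1) 0 ∈ CT ∧
          PySem.List.pyGetD melody i 0 ∉ CT then
        if (PySem.Int.mod (PySem.List.pyGetD melody i 0 - PySem.List.pyGetD melody (i - 1) 0) 12 = 1 ∨
            PySem.Int.mod (PySem.List.pyGetD melody i 0 - PySem.List.pyGetD melody (i - 1) 0) 12 = 2 ∨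
            PySem.Int.mod (PySem.List.pyGetD melody i 0 - PySem.List.pyGetD melody (i - 1) 0) 12 = 10 ∨
            PySem.Int.mod (PySem.List.pyGetD melody i 0 - PySem.List.pyGetD melody (i - 1) 0) 12 = 11) ∧
            (PySem.Int.mod (PySem.List.pyGetD melody (i + 1) 0 - PySem.List.pyGetD melody i 0) 12 = 1 ∨
            PySem.Int.mod (PySem.List.pyGetD melody (i + 1) 0 - PySem.List.pyGetD melody i 0) 12 = 2 ∨
            PySem.Int.mod (PySem.List.pyGetD melody (i + 1) 0 - PySem.List.pyGetD melody i 0) 12 = 10 ∨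
            PySem.Int.mod (PySem.List.pyGetD melody (i + 1) 0 - PySem.List.pyGetD melody i 0) 12 = 11) then
          if PySem.List.pyGetD melody i 0 ∈ cs then d.modify i [] (· ++ ["passing_tone"])
          else d.modify i [] (· ++ ["chromatic_passing_tone"])
        else d
      else d) D3 with hD4
  have k0 : D0.keys = PySem.List.pyRange 0 n := by
    rw [hD0, PySem.Dict.keys_foldl_insert (f := fun _ _ => ([] : List String))]
    have he : (PySem.Dict.empty : PySem.Dict Int (List String)).keys = ([] : List Int) := rfl
    rw [he]
    exact PySem.Set.ofList_eq_self_of_nodup _ (PySem.List.nodup_pyRange_one 0 n)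
  have hmem : ∀ i : Int, 1 ≤ i → i < n - 1 →
      (i - 1 ∈ PySem.List.pyRange 0 n ∧ i ∈ PySem.List.pyRange 0 n ∧ i + 1 ∈ PySem.List.pyRange 0 n) := by
    intro i h1 h2
    refine ⟨?_, ?_, ?_⟩ <;> rw [PySem.List.mem_pyRange_one] <;> omega
  have k1 : D1.keys = PySem.List.pyRange 0 n := by
    rw [hD1]
    refine pv_keys_foldl _ _ _ ?_ _ k0
    intro d p hp hd
    have hb := pv_mem_enumerate_bounds melody 0 p hp
    have hm : p.1 ∈ PySem.List.pyRange 0 n := by rw [PySem.List.mem_pyRange_one, hn]; omega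
    split_ifs <;> first
      | exact hd
      | exact pv_keys_modify_mem _ _ _ _ hd hm
  have k2 : D2.keys = PySem.List.pyRange 0 n := by
    rw [hD2]
    refine pv_keys_foldl _ _ _ ?_ _ k1
    intro d i hi hd
    rw [PySem.List.mem_pyRange_one] at hi
    obtain ⟨hm1, hm2, hm3⟩ := hmem i hi.1 hi.2
    split_ifs
    · exact pv_keys_modify_mem _ _ _ _ (pv_keys_modify_mem _ _ _ _ (pv_keys_modify_mem _ _ _ _ hd hm1) hm2) hm3
    · exact hd
  have k3 : D3.keys = PySem.List.pyRange 0 n := by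
    rw [hD3]
    refine pv_keys_foldl _ _ _ ?_ _ k2
    intro d i hi hd
    rw [PySem.List.mem_pyRange_one] at hi
    obtain ⟨_, hm2, _⟩ := hmem i hi.1 hi.2
    split_ifs <;> first
      | exact hd
      | exact pv_keys_modify_mem _ _ _ _ hd hm2
  have k4 : D4.keys = PySem.List.pyRange 0 n := by
    rw [hD4]
    refine pv_keys_foldl _ _ _ ?_ _ k3
    intro d i hi hd
    rw [PySem.List.mem_pyRange_one] at hi
    obtain ⟨_, hm2, _⟩ := hmem i hi.1 hi.2
    split_ifs <;> first
      | exact hd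
      | exact pv_keys_modify_mem _ _ _ _ hd hm2
  rw [PySem.Dict.items_eq_map_keys D4 (by rw [k4]; exact PySem.List.nodup_pyRange_one 0 n) ([] : List String), k4]
  apply List.map_congr_left
  intro k hk
  rw [PySem.List.mem_pyRange_one] at hk
  congr 1
  rw [hD4, pv_getD_pass4
      (C1 := fun i => PySem.List.pyGetD melody (i - 1) 0 ∈ CT ∧ PySem.List.pyGetD melody (i + 1) 0 ∈ CT ∧ PySem.List.pyGetD melody i 0 ∉ CT)
      (C2 := fun i => (PySem.Int.mod (PySem.List.pyGetD melody i 0 - PySem.List.pyGetD melody (i - 1) 0) 12 = 1 ∨ PySem.Int.mod (PySem.List.pyGetD melody i 0 - PySem.List.pyGetD melody (i - 1) 0) 12 = 2 ∨ PySem.Int.mod (PySem.List.pyGetD melody i 0 - PySem.List.pyGetD melody (i - 1) 0) 12 = 10 ∨ PySem.Int.mod (PySem.List.pyGetD melody i 0 - PySem.List.pyGetD melody (i - 1) 0) 12 = 11) ∧ (PySem.Int.mod (PySem.List.pyGetD melody (i + 1) 0 - PySem.List.pyGetD melody i 0) 12 = 1 ∨ PySem.Int.mod (PySem.List.pyGetD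 melody (i + 1) 0 - PySem.List.pyGetD melody i 0) 12 = 2 ∨ PySem.Int.mod (PySem.List.pyGetD melody (i + 1) 0 - PySem.List.pyGetD melody i 0) 12 = 10 ∨ PySem.Int.mod (PySem.List.pyGetD melody (i + 1) 0 - PySem.List.pyGetD melody i 0) 12 = 11))
      (C3 := fun i => PySem.List.pyGetD melody i 0 ∈ cs)]
  rw [hD3, pv_getD_pass3
      (C1 := fun i => PySem.List.pyGetD melody (i - 1) 0 = PySem.List.pyGetD melody (i + 1) 0 ∧ PySem.List.pyGetD melody (i - 1) 0 ∈ CT)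
      (C2 := fun i => PySem.Int.mod (PySem.List.pyGetD melody i 0 - PySem.List.pyGetD melody (i - 1) 0) 12 = 1 ∨ PySem.Int.mod (PySem.List.pyGetD melody i 0 - PySem.List.pyGetD melody (i - 1) 0) 12 = 2)
      (C3 := fun i => PySem.Int.mod (PySem.List.pyGetD melody i 0 - PySem.List.pyGetD melody (i - 1) 0) 12 = 10 ∨ PySem.Int.mod (PySem.List.pyGetD melody i 0 - PySem.List.pyGetD melody (i - 1) 0) 12 = 11)]
  rw [hD2, pv_getD_pass2
      (cond := fun i => (PySem.Int.mod (PySem.List.pyGetD melody i 0 - PySem.List.pyGetD melody (i - 1) 0) 12 = 1 ∨ PySem.Int.mod (PySem.List.pyGetD melody i 0 - PySem.List.pyGetD melody (i - 1) 0) 12 = 2 ∨ PySem.Int.mod (PySem.List.pyGetD melody i 0 - PySem.List.pyGetD melody (i - 1) 0) 12 = 10 ∨ PySem.Int.mod (PySem.List.pyGetD melody i 0 - PySem.List.pyGetD melody (i - 1) 0) 12 = 11) ∧ PySem.Int.mod (PySem.List.pyGetD melody (i + 1) 0 - PySem.List.pyGetD melody i 0) 12 = PySem.Int.mod (PySem.List.pyGetD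 melody i 0 - PySem.List.pyGetD melody (i - 1) 0) 12)]
  rw [hD1, pv_getD_pass1 GT CT]
  rw [hD0, pv_getD_init _ _ (fun c => by simp) k]
  rw [pv_scale_filter n k (q := fun i => decide ((PySem.Int.mod (PySem.List.pyGetD melody i 0 - PySem.List.pyGetD melody (i - 1) 0) 12 = 1 ∨ PySem.Int.mod (PySem.List.pyGetD melody i 0 - PySem.List.pyGetD melody (i - 1) 0) 12 = 2 ∨ PySem.Int.mod (PySem.List.pyGetD melody i 0 - PySem.List.pyGetD melody (i - 1) 0) 12 = 10 ∨ PySem.Int.mod (PySem.List.pyGetD melody i 0 - PySem.List.pyGetD melody (i - 1) 0) 12 = 11) ∧ PySem.Int.mod (PySem.List.pyGetD melody (i + 1) 0 - PySem.List.pyGetD melody i 0) 12 = PySem.Int.mod (PySem.List.pyGetD melody i 0 - PySem.List.pyGetD melody (i - 1) 0) 12))]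
  have hq1 : ∀ pr : Int × Int, (decide (pr.1 = k) && (decide (pr.2 ∈ GT) || decide (pr.2 ∈ CT))) = true → pr.1 = k := by
    intro pr h
    simp only [Bool.and_eq_true, decide_eq_true_eq] at h
    exact h.1
  rw [pv_enum_filter melody 0 k _ hq1 ⟨by omega, by omega⟩]
  have hnd : (PySem.List.pyRange 1 (n - 1)).Nodup := PySem.List.nodup_pyRange_one 1 (n - 1)
  have hp3 : ∀ i : Int, (decide (i = k) &&
      decide (PySem.List.pyGetD melody (i - 1) 0 = PySem.List.pyGetD melody (i + 1) 0 ∧ PySem.List.pyGetD melody (i - 1) 0 ∈ CT) &&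
      (decide (PySem.Int.mod (PySem.List.pyGetD melody i 0 - PySem.List.pyGetD melody (i - 1) 0) 12 = 1 ∨ PySem.Int.mod (PySem.List.pyGetD melody i 0 - PySem.List.pyGetD melody (i - 1) 0) 12 = 2) || decide (PySem.Int.mod (PySem.List.pyGetD melody i 0 - PySem.List.pyGetD melody (i - 1) 0) 12 = 10 ∨ PySem.Int.mod (PySem.List.pyGetD melody i 0 - PySem.List.pyGetD melody (i - 1) 0) 12 = 11))) = true → i = k := by
    intro i h
    simp only [Bool.and_eq_true, decide_eq_true_eq] at h
    exact h.1.1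
  rw [pv_filter_eq_single _ hnd k _ hp3]
  have hp4 : ∀ i : Int, (decide (i = k) &&
      decide (PySem.List.pyGetD melody (i - 1) 0 ∈ CT ∧ PySem.List.pyGetD melody (i + 1) 0 ∈ CT ∧ PySem.List.pyGetD melody i 0 ∉ CT) &&
      decide ((PySem.Int.mod (PySem.List.pyGetD melody i 0 - PySem.List.pyGetD melody (i - 1) 0) 12 = 1 ∨ PySem.Int.mod (PySem.List.pyGetD melody i 0 - PySem.List.pyGetD melody (i - 1) 0) 12 = 2 ∨ PySem.Int.mod (PySem.List.pyGetD melody i 0 - PySem.List.pyGetD melody (i - 1) 0) 12 = 10 ∨ PySem.Int.mod (PySem.List.pyGetD melody i 0 - PySem.List.pyGetD melody (i - 1) 0) 12 = 11) ∧ (PySem.Int.mod (PySem.List.pyGetD melody (i + 1) 0 - PySem.List.pyGetD melody i 0) 12 = 1 ∨ PySem.Int.mod (PySem.List.pyGetD melody (i + 1) 0 - PySem.List.pyGetD melody i 0) 12 = 2 ∨ PySem.Int.mod (PySem.List.pyGetD melody (i + 1) 0 - PySem.List.pyGetD melody i 0) 12 = 10 ∨ PySem.Int.mod (PySem.List.pyGetD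 melody (i + 1) 0 - PySem.List.pyGetD melody i 0) 12 = 11))) = true → i = k := by
    intro i h
    simp only [Bool.and_eq_true, decide_eq_true_eq] at h
    exact h.1.1
  rw [pv_filter_eq_single _ hnd k _ hp4]
  simp only [List.nil_append, PySem.Set.mem_ofList, PySem.List.mem_pyRange_one, sub_zero,
    decide_eq_true_eq, Bool.and_eq_true, Bool.or_eq_true, decide_true, true_and]
  clear hD0 hD1 hD2 hD3 hD4 k0 k1 k2 k3 k4 hmem hq1 hp3 hp4 hnd hk
  clear_value D0 D1 D2 D3 D4
  clear D0 D1 D2 D3 D4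
  have eg : List.map (fun p : Int × Int => if p.2 ∈ GT then "guide_tone" else "chord_tone")
      (if PySem.List.pyGetD melody k 0 ∈ GT ∨ PySem.List.pyGetD melody k 0 ∈ CT then [(k, PySem.List.pyGetD melody k 0)] else [])
      = (if PySem.List.pyGetD melody k 0 ∈ GT then ["guide_tone"] else if PySem.List.pyGetD melody k 0 ∈ CT then ["chord_tone"] else []) := by
    by_cases hg : PySem.List.pyGetD melody k 0 ∈ GT
    · rw [if_pos (Or.inl hg), if_pos hg]
      simp only [List.map_cons, List.map_nil]
      rw [if_pos hg]
    · by_cases hc : PySem.List.pyGetD melody k 0 ∈ CT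
      · rw [if_pos (Or.inr hc), if_neg hg]
        simp only [List.map_cons, List.map_nil]
        rw [if_neg hg, if_pos hc]
      · rw [if_neg (by tauto), if_neg hg, if_neg hc]
        rfl
  rw [eg]
  by_cases hr : 1 ≤ k ∧ k < n - 1
  · have hr2 : 1 ≤ k ∧ k ≤ n - 2 := by omega
    simp only [hr, hr2, if_true, and_true, true_and]
    have en : List.map (fun i => if PySem.Int.mod (PySem.List.pyGetD melody i 0 - PySem.List.pyGetD melody (i - 1) 0) 12 = 1 ∨ PySem.Int.mod (PySem.List.pyGetD melody i 0 - PySem.List.pyGetD melody (i - 1) 0) 12 = 2 then "upper_neighbor" else "lower_neighbor")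
        (if (PySem.List.pyGetD melody (k - 1) 0 = PySem.List.pyGetD melody (k + 1) 0 ∧ PySem.List.pyGetD melody (k - 1) 0 ∈ CT) ∧ ((PySem.Int.mod (PySem.List.pyGetD melody k 0 - PySem.List.pyGetD melody (k - 1) 0) 12 = 1 ∨ PySem.Int.mod (PySem.List.pyGetD melody k 0 - PySem.List.pyGetD melody (k - 1) 0) 12 = 2) ∨ PySem.Int.mod (PySem.List.pyGetD melody k 0 - PySem.List.pyGetD melody (k - 1) 0) 12 = 10 ∨ PySem.Int.mod (PySem.List.pyGetD melody k 0 - PySem.List.pyGetD melody (k - 1) 0) 12 = 11) then [k] else [])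
        = (if PySem.List.pyGetD melody (k - 1) 0 = PySem.List.pyGetD melody (k + 1) 0 ∧ PySem.List.pyGetD melody (k - 1) 0 ∈ CT then
            if PySem.Int.mod (PySem.List.pyGetD melody k 0 - PySem.List.pyGetD melody (k - 1) 0) 12 = 1 ∨ PySem.Int.mod (PySem.List.pyGetD melody k 0 - PySem.List.pyGetD melody (k - 1) 0) 12 = 2 then ["upper_neighbor"]
            else if PySem.Int.mod (PySem.List.pyGetD melody k 0 - PySem.List.pyGetD melody (k - 1) 0) 12 = 10 ∨ PySem.Int.mod (PySem.List.pyGetD melody k 0 - PySem.List.pyGetD melody (k - 1) 0) 12 = 11 then ["lower_neighbor"]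
            else []
          else []) := by
      by_cases h1 : PySem.List.pyGetD melody (k - 1) 0 = PySem.List.pyGetD melody (k + 1) 0 ∧ PySem.List.pyGetD melody (k - 1) 0 ∈ CT
      · by_cases h2 : PySem.Int.mod (PySem.List.pyGetD melody k 0 - PySem.List.pyGetD melody (k - 1) 0) 12 = 1 ∨ PySem.Int.mod (PySem.List.pyGetD melody k 0 - PySem.List.pyGetD melody (k - 1) 0) 12 = 2
        · rw [if_pos ⟨h1, Or.inl h2⟩]
          simp only [List.map_cons, List.map_nil]
          rw [if_pos h2, if_pos h1, if_pos h2]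
        · by_cases h3 : PySem.Int.mod (PySem.List.pyGetD melody k 0 - PySem.List.pyGetD melody (k - 1) 0) 12 = 10 ∨ PySem.Int.mod (PySem.List.pyGetD melody k 0 - PySem.List.pyGetD melody (k - 1) 0) 12 = 11
          · rw [if_pos ⟨h1, Or.inr h3⟩]
            simp only [List.map_cons, List.map_nil]
            rw [if_neg h2, if_pos h1, if_neg h2, if_pos h3]
          · rw [if_neg (by tauto), if_pos h1, if_neg h2, if_neg h3]
            rfl
      · rw [if_neg (by tauto), if_neg h1]
        rfl
    have ep : List.map (fun i => if PySem.List.pyGetD melody i 0 ∈ cs then "passing_tone" else "chromatic_passing_tone")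
        (if (PySem.List.pyGetD melody (k - 1) 0 ∈ CT ∧ PySem.List.pyGetD melody (k + 1) 0 ∈ CT ∧ PySem.List.pyGetD melody k 0 ∉ CT) ∧ (PySem.Int.mod (PySem.List.pyGetD melody k 0 - PySem.List.pyGetD melody (k - 1) 0) 12 = 1 ∨ PySem.Int.mod (PySem.List.pyGetD melody k 0 - PySem.List.pyGetD melody (k - 1) 0) 12 = 2 ∨ PySem.Int.mod (PySem.List.pyGetD melody k 0 - PySem.List.pyGetD melody (k - 1) 0) 12 = 10 ∨ PySem.Int.mod (PySem.List.pyGetD melody k 0 - PySem.List.pyGetD melody (k - 1) 0) 12 = 11) ∧ (PySem.Int.mod (PySem.List.pyGetD melody (k + 1) 0 - PySem.List.pyGetD melody k 0) 12 = 1 ∨ PySem.Int.mod (PySem.List.pyGetD melody (k + 1) 0 - PySem.List.pyGetD melody k 0) 12 = 2 ∨ PySem.Int.mod (PySem.List.pyGetD melody (k + 1) 0 - PySem.List.pyGetD melody k 0) 12 = 10 ∨ PySem.Int.mod (PySem.List.pyGetD melody (k + 1) 0 - PySem.List.pyGetD melody k 0) 12 = 11) then [k] else [])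
        = (if PySem.List.pyGetD melody (k - 1) 0 ∈ CT ∧ PySem.List.pyGetD melody (k + 1) 0 ∈ CT ∧ PySem.List.pyGetD melody k 0 ∉ CT then
            if (PySem.Int.mod (PySem.List.pyGetD melody k 0 - PySem.List.pyGetD melody (k - 1) 0) 12 = 1 ∨ PySem.Int.mod (PySem.List.pyGetD melody k 0 - PySem.List.pyGetD melody (k - 1) 0) 12 = 2 ∨ PySem.Int.mod (PySem.List.pyGetD melody k 0 - PySem.List.pyGetD melody (k - 1) 0) 12 = 10 ∨ PySem.Int.mod (PySem.List.pyGetD melody k 0 - PySem.List.pyGetD melody (k - 1) 0) 12 = 11) ∧ (PySem.Int.mod (PySem.List.pyGetD melody (k + 1) 0 - PySem.List.pyGetD melody k 0) 12 = 1 ∨ PySem.Int.mod (PySem.List.pyGetD melody (k + 1) 0 - PySem.List.pyGetD melody k 0) 12 = 2 ∨ PySem.Int.mod (PySem.List.pyGetD melody (k + 1) 0 - PySem.List.pyGetD melody k 0) 12 = 10 ∨ PySem.Int.mod (PySem.List.pyGetD melody (k + 1) 0 - PySem.List.pyGetD melody k 0) 12 = 11) then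
              if PySem.List.pyGetD melody k 0 ∈ cs then ["passing_tone"] else ["chromatic_passing_tone"]
            else []
          else []) := by
      by_cases h1 : PySem.List.pyGetD melody (k - 1) 0 ∈ CT ∧ PySem.List.pyGetD melody (k + 1) 0 ∈ CT ∧ PySem.List.pyGetD melody k 0 ∉ CT
      · by_cases h2 : (PySem.Int.mod (PySem.List.pyGetD melody k 0 - PySem.List.pyGetD melody (k - 1) 0) 12 = 1 ∨ PySem.Int.mod (PySem.List.pyGetD melody k 0 - PySem.List.pyGetD melody (k - 1) 0) 12 = 2 ∨ PySem.Int.mod (PySem.List.pyGetD melody k 0 - PySem.List.pyGetD melody (k - 1) 0) 12 = 10 ∨ PySem.Int.mod (PySem.List.pyGetD melody k 0 - PySem.List.pyGetD melody (k - 1) 0) 12 = 11) ∧ (PySem.Int.mod (PySem.List.pyGetD melody (k + 1) 0 - PySem.List.pyGetD melody k 0) 12 = 1 ∨ PySem.Int.mod (PySem.List.pyGetD melody (k + 1) 0 - PySem.List.pyGetD melody k 0) 12 = 2 ∨ PySem.Int.mod (PySem.List.pyGetD melody (k + 1) 0 - PySem.List.pyGetD melody k 0) 12 = 10 ∨ PySem.Int.mod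 (PySem.List.pyGetD melody (k + 1) 0 - PySem.List.pyGetD melody k 0) 12 = 11)
        · rw [if_pos ⟨h1, h2⟩]
          simp only [List.map_cons, List.map_nil]
          rw [if_pos h1, if_pos h2]
          by_cases h3 : PySem.List.pyGetD melody k 0 ∈ cs
          · rw [if_pos h3, if_pos h3]
          · rw [if_neg h3, if_neg h3]
        · rw [if_neg (by tauto), if_pos h1, if_neg h2]
          rfl
      · rw [if_neg (by tauto), if_neg h1]
        rfl
    rw [en, ep]
    simp only [List.append_assoc]
  · have hr2 : ¬(1 ≤ k ∧ k ≤ n - 2) := by omega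
    simp [hr, hr2]
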